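-- pv_equiv track=rewrite | github.com/Arthur-g-p/RAGScope | main.py | _is_simple_name
-- ===== SOURCE A (Python) =====
-- def _is_simple_name(s: str) -> bool:
--     # Allow simple names without separators or traversal
--     if not s:
--         return False
--     if ".." in s:
--         return False
--     if any(ch in s for ch in ("/", "\\", ":")):
--         return False
--     return True
-- ===== SOURCE B (Python) =====
-- def _is_simple_name(s: str) -> bool:
--     # Single pass: reject separator chars and consecutive dots while scanning.
--     if not s:
--         return False
--     prev_dot = False
--     for ch in s:
--         if ch == '/' or ch == '\\' or ch == ':':
--             return False
--         if prev_dot and ch == '.':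
--             return False
--         prev_dot = ch == '.'
--     return True
-- ===== Notes on version B (the rewrite author's own statement) =====
-- stated objective: alternative
-- what changed: Replaces the substring search for a double dot plus the any(...) membership scans (four passes over s) by one left-to-right pass that tracks whether the previous character was a dot and rejects forbidden characters and consecutive dots on the fly.
import Mathlib
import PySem

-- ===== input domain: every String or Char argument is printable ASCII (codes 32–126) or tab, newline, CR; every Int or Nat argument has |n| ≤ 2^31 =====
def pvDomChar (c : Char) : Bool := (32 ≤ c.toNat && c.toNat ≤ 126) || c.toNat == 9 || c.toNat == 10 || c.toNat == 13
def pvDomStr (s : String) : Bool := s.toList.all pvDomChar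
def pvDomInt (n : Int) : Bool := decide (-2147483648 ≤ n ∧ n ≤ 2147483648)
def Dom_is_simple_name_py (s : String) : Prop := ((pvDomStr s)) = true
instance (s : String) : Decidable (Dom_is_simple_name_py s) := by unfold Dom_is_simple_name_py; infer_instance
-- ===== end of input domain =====

-- B replaces A's substring search + any(...) scans with one pass tracking a prev-dot flag (alternative, same cost).

-- ===== PORT A =====
def is_simple_name_py (s : String) : Bool :=
  if s == "" then false
  else if PySem.Str.isIn ".." s then false
  else if ["/", "\\", ":"].any (fun ch => PySem.Str.isIn ch s) then false
  else true

-- ===== PORT B =====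
def is_simple_name_py_altLoop : Bool → List Char → Bool
  | _, [] => true
  | prevDot, c :: rest =>
    if c = '/' ∨ c = '\\' ∨ c = ':' then false
    else if prevDot = true ∧ c = '.' then false
    else is_simple_name_py_altLoop (decide (c = '.')) rest

def is_simple_name_py_alt (s : String) : Bool :=
  if s.toList = [] then false
  else is_simple_name_py_altLoop false s.toList

-- ===== PRECONDITION & SPEC =====
def Spec_is_simple_name_py (s : String) (out : Bool) : Prop := out = is_simple_name_py_alt s
instance (s : String) (out : Bool) : Decidable (Spec_is_simple_name_py s out) := by unfold Spec_is_simple_name_py; infer_instance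

-- ===== CLAIM (what is proved, stated in full; the proofs are below) =====
def Claim_equal_is_simple_name_py : Prop := ∀ (s : String), Dom_is_simple_name_py s → Spec_is_simple_name_py s (is_simple_name_py s)

-- ===== LEMMAS AND PROOFS =====

theorem singleton_prefix_iff (a : Char) (l : List Char) : [a] <+: l ↔ l.head? = some a := by
  cases l with
  | nil => simp
  | cons b t => simp [List.cons_prefix_cons, eq_comm]

theorem singleton_infix_iff (a : Char) (l : List Char) : [a] <:+: l ↔ a ∈ l := by
  constructor
  · intro h
    exact (List.singleton_sublist).1 h.sublist
  · intro h
    obtain ⟨l₁, l₂, rfl⟩ := List.append_of_mem h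
    exact ⟨l₁, l₂, by simp⟩

theorem altLoop_eq_true_iff (cs : List Char) : ∀ (prev : Bool),
    is_simple_name_py_altLoop prev cs = true ↔
      ((∀ c ∈ cs, ¬(c = '/' ∨ c = '\\' ∨ c = ':')) ∧ ¬(['.', '.'] <:+: cs) ∧
        (prev = true → cs.head? ≠ some '.')) := by
  induction cs with
  | nil => intro prev; simp [is_simple_name_py_altLoop]
  | cons c rest ih =>
    intro prev
    rw [is_simple_name_py_altLoop]
    by_cases hbad : c = '/' ∨ c = '\\' ∨ c = ':'
    · simp only [if_pos hbad]
      constructor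
      · intro h; exact absurd h (by simp)
      · rintro ⟨hall, -, -⟩
        exact absurd hbad (hall c (by simp))
    · rw [if_neg hbad]
      by_cases hpd : prev = true ∧ c = '.'
      · rw [if_pos hpd]
        constructor
        · intro h; exact absurd h (by simp)
        · rintro ⟨-, -, hhd⟩
          exact absurd (by simp [hpd.2]) (hhd hpd.1)
      · rw [if_neg hpd, ih]
        have hinfix : ['.', '.'] <:+: c :: rest ↔
            (c = '.' ∧ rest.head? = some '.') ∨ ['.', '.'] <:+: rest := by
          rw [List.infix_cons_iff]
          constructor
          · rintro (h | h)
            · left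
              rw [List.cons_prefix_cons] at h
              exact ⟨h.1.symm, (singleton_prefix_iff _ _).1 h.2⟩
            · exact Or.inr h
          · rintro (⟨h1, h2⟩ | h)
            · left
              rw [List.cons_prefix_cons]
              exact ⟨h1.symm, (singleton_prefix_iff _ _).2 h2⟩
            · exact Or.inr h
        constructor
        · rintro ⟨hall, hnf, hhd⟩
          refine ⟨?_, ?_, ?_⟩
          · intro x hx
            rcases List.mem_cons.1 hx with rfl | hx
            · exact hbad
            · exact hall x hx
          · rw [hinfix]
            rintro (⟨hc, hh⟩ | h)
            · exact (hhd (by simp [hc])) hh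
            · exact hnf h
          · intro hp hh
            exact hpd ⟨hp, by
              by_contra hc
              simp [hc] at hh⟩
        · rintro ⟨hall, hnf, hhd⟩
          rw [hinfix] at hnf
          refine ⟨fun x hx => hall x (List.mem_cons_of_mem _ hx), fun h => hnf (Or.inr h), ?_⟩
          · intro hp hh
            have hc : c = '.' := by simpa using hp
            exact hnf (Or.inl ⟨hc, hh⟩)

theorem str_eq_empty_iff (s : String) : (s == "") = true ↔ s.toList = [] := by
  constructor
  · intro h
    have : s = "" := by exact beq_iff_eq.1 h
    simp [this]
  · intro h
    have : s = "" := by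
      have h2 := congrArg String.ofList h
      simpa using h2
    simp [this]

-- ===== VERDICT (by name: the statement is the Claim_ definition above) =====
theorem is_simple_name_py_spec : Claim_equal_is_simple_name_py := by
  intro s _
  unfold Spec_is_simple_name_py
  unfold is_simple_name_py is_simple_name_py_alt
  by_cases hs : s.toList = []
  · rw [if_pos ((str_eq_empty_iff s).2 hs), if_pos hs]
  · rw [if_neg (by intro h; exact hs ((str_eq_empty_iff s).1 h)), if_neg hs]
    rw [Bool.eq_iff_iff]
    have hchain : (if PySem.Str.isIn ".." s then false
        else if ["/", "\\", ":"].any (fun ch => PySem.Str.isIn ch s) then false else true) = true ↔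
        (¬ PySem.Str.isIn ".." s = true ∧
          ¬ (["/", "\\", ":"].any (fun ch => PySem.Str.isIn ch s)) = true) := by
      split_ifs with h1 h2 <;> simp_all
    rw [hchain, altLoop_eq_true_iff]
    have hdots : PySem.Str.isIn ".." s = true ↔ ['.', '.'] <:+: s.toList := by
      simpa using PySem.Str.isIn_iff_infix ".." s
    have hany : (["/", "\\", ":"].any (fun ch => PySem.Str.isIn ch s)) = true ↔
        ('/' ∈ s.toList ∨ '\\' ∈ s.toList ∨ ':' ∈ s.toList) := by
      simp only [List.any_cons, List.any_nil, Bool.or_eq_true, Bool.false_eq_true, or_false]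
      rw [show PySem.Str.isIn "/" s = true ↔ '/' ∈ s.toList by
            simpa [singleton_infix_iff] using PySem.Str.isIn_iff_infix "/" s,
          show PySem.Str.isIn "\\" s = true ↔ '\\' ∈ s.toList by
            simpa [singleton_infix_iff] using PySem.Str.isIn_iff_infix "\\" s,
          show PySem.Str.isIn ":" s = true ↔ ':' ∈ s.toList by
            simpa [singleton_infix_iff] using PySem.Str.isIn_iff_infix ":" s]
    rw [hdots, hany]
    constructor
    · rintro ⟨hnd, hnany⟩
      refine ⟨?_, hnd, by simp⟩
      rintro c hc (rfl | rfl | rfl)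
      · exact hnany (Or.inl hc)
      · exact hnany (Or.inr (Or.inl hc))
      · exact hnany (Or.inr (Or.inr hc))
    · rintro ⟨hall, hnd, -⟩
      refine ⟨hnd, ?_⟩
      rintro (h | h | h)
      · exact hall _ h (Or.inl rfl)
      · exact hall _ h (Or.inr (Or.inl rfl))
      · exact hall _ h (Or.inr (Or.inr rfl))
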